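-- pv_equiv track=rewrite | github.com/thanhtoan1742/ganh | src/minimax_player_clone.py | get_player_position
-- ===== SOURCE A (Python) =====
-- dx = [-1, -1, 0, 1, 1, 1, 0, -1]
--
-- dy = [0, 1, 1, 1, 0, -1, -1, -1]
--
-- def is_in_range(x, y):
--     return x >= 0 and y >= 0 and x < 5 and y < 5
--
-- def get_neighbor(x, y):
--     res = []
--     for i in range(8):
--         if (x + y)%2 == 1 and i%2 == 1:
--             continue
--
--         u = x + dx[i]
--         v = y + dy[i]
--         if is_in_range(u, v):
--             res.append((u, v))
--     return res
--
-- def get_cell_value_neighbor(board, cell_value, x, y):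
--     res = []
--     for u, v in get_neighbor(x, y):
--         if board[u][v] == cell_value:
--             res.append((u, v))
--     return res
--
-- def get_player_position(board, player):
--     pos = []
--     for x in range(5):
--         for y in range(5):
--             if board[x][y] != player:
--                 continue
--
--             # get all neighbor empty cell.
--             if len(get_cell_value_neighbor(board, 0, x, y)) == 0:
--                 continue
--
--             pos.append((x, y))
--     return pos
-- ===== SOURCE B (Python) =====
-- # B: empty-driven scan. Instead of testing each player piece for an empty
-- # neighbour, flag the player-valued neighbours of every empty cell (the
-- # neighbour relation is symmetric), then emit flagged cells in board order.
--
-- def _neighbors(x, y):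
--     offs = [(-1, 0), (1, 0), (0, -1), (0, 1)]
--     if (x + y) % 2 == 0:
--         offs += [(-1, 1), (1, 1), (1, -1), (-1, -1)]
--     return [(x + a, y + b) for a, b in offs
--             if 0 <= x + a < 5 and 0 <= y + b < 5]
--
-- def get_player_position(board, player):
--     flagged = set()
--     for x in range(5):
--         for y in range(5):
--             if board[x][y] == 0:
--                 for u, v in _neighbors(x, y):
--                     if board[u][v] == player:
--                         flagged.add((u, v))
--     return [(x, y) for x in range(5) for y in range(5) if (x, y) in flagged]
-- ===== Notes on version B (the rewrite author's own statement) =====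
-- stated objective: alternative
-- what changed: B inverts the scan: instead of testing each player piece for an empty neighbour, it flags the player-valued neighbours of every empty cell (the neighbour relation is symmetric) and then emits the flagged cells in board order; the flagged positions are kept in a set instead of re-scanning neighbours per piece.
import Mathlib
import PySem

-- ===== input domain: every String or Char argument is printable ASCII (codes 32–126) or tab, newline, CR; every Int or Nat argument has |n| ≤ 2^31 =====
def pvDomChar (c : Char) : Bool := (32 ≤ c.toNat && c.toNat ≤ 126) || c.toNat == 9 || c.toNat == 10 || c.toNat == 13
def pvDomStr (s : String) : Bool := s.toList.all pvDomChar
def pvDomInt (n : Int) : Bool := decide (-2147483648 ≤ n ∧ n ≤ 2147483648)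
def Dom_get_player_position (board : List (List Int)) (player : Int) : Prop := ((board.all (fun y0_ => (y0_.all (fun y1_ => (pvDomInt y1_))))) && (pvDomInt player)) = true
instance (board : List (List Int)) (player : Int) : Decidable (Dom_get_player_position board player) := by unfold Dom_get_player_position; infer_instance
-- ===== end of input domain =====

-- B inverts the scan: it flags the player-valued neighbours of every empty cell (the
-- neighbour relation is symmetric) and emits flagged cells in board order; alternative
-- decomposition, same cost.

-- ===== PORT A =====
def pvDx : List Int := [-1, -1, 0, 1, 1, 1, 0, -1]
def pvDy : List Int := [0, 1, 1, 1, 0, -1, -1, -1]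

def is_in_range (x y : Int) : Bool := x ≥ 0 && y ≥ 0 && x < 5 && y < 5

def get_neighbor (x y : Int) : List (Int × Int) :=
  (PySem.List.pyRange 0 8 1).foldl (fun res i =>
    if PySem.Int.mod (x + y) 2 == 1 && PySem.Int.mod i 2 == 1 then res
    else
      let u := x + PySem.List.pyGetD pvDx i 0   -- dx[i]; i ∈ range(8), always in range
      let v := y + PySem.List.pyGetD pvDy i 0
      if is_in_range u v then res ++ [(u, v)] else res) []

-- board[u][v]; exact under Pre_ (both indices are in 0..4 and the board is ≥ 5×5)
def pvCell (board : List (List Int)) (u v : Int) : Int :=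
  PySem.List.pyGetD (PySem.List.pyGetD board u []) v 0

def get_cell_value_neighbor (board : List (List Int)) (cell_value x y : Int) : List (Int × Int) :=
  (get_neighbor x y).foldl (fun res uv =>
    if pvCell board uv.1 uv.2 == cell_value then res ++ [uv] else res) []

def get_player_position (board : List (List Int)) (player : Int) : List (Int × Int) :=
  (PySem.List.pyRange 0 5 1).foldl (fun pos x =>
    (PySem.List.pyRange 0 5 1).foldl (fun pos y =>
      if pvCell board x y != player then pos
      else if (get_cell_value_neighbor board 0 x y).length == 0 then pos
      else pos ++ [(x, y)]) pos) []

-- ===== PORT B =====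
def pvNeighborsB (x y : Int) : List (Int × Int) :=
  let offs : List (Int × Int) := [(-1, 0), (1, 0), (0, -1), (0, 1)]
  let offs := if PySem.Int.mod (x + y) 2 == 0
              then offs ++ [(-1, 1), (1, 1), (1, -1), (-1, -1)] else offs
  (offs.filter (fun ab =>
      0 ≤ x + ab.1 && x + ab.1 < 5 && 0 ≤ y + ab.2 && y + ab.2 < 5)).map
    (fun ab => (x + ab.1, y + ab.2))

def pvFlagged (board : List (List Int)) (player : Int) : PySem.Set (Int × Int) :=
  (PySem.List.pyRange 0 5 1).foldl (fun s x =>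
    (PySem.List.pyRange 0 5 1).foldl (fun s y =>
      if pvCell board x y == 0 then
        (pvNeighborsB x y).foldl (fun s uv =>
          if pvCell board uv.1 uv.2 == player then PySem.Set.add s uv else s) s
      else s) s) PySem.Set.empty

def get_player_position_alt (board : List (List Int)) (player : Int) : List (Int × Int) :=
  let flagged := pvFlagged board player
  (PySem.List.pyRange 0 5 1).foldl (fun acc x =>
    (PySem.List.pyRange 0 5 1).foldl (fun acc y =>
      if PySem.Set.contains flagged (x, y) then acc ++ [(x, y)] else acc) acc) []

-- ===== PRECONDITION & SPEC =====
-- Pre_ excludes exactly the boards on which the Python A raises IndexError: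
-- A unconditionally reads board[x][y] for all x, y in range(5).
def Pre_get_player_position (board : List (List Int)) (player : Int) : Prop :=
  5 ≤ board.length ∧ ∀ row ∈ board.take 5, 5 ≤ row.length
instance (board : List (List Int)) (player : Int) : Decidable (Pre_get_player_position board player) := by unfold Pre_get_player_position; infer_instance

def pvWitness_get_player_position : List (List Int) × Int :=
  ([[0, 1, 0, 0, 0], [0, 0, 0, 0, 0], [0, 0, 2, 0, 0], [0, 0, 0, 0, 0], [0, 0, 0, 0, 1]], 1)

def Spec_get_player_position (board : List (List Int)) (player : Int) (out : List (Int × Int)) : Prop := out = get_player_position_alt board player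
instance (board : List (List Int)) (player : Int) (out : List (Int × Int)) : Decidable (Spec_get_player_position board player out) := by unfold Spec_get_player_position; infer_instance

-- ===== CLAIM (what is proved, stated in full; the proofs are below) =====
def Claim_equal_get_player_position : Prop := ∀ (board : List (List Int)) (player : Int), Dom_get_player_position board player → Pre_get_player_position board player → Spec_get_player_position board player (get_player_position board player)

-- ===== LEMMAS AND PROOFS =====

-- both programs are a board-order scan emitting the cells satisfying a predicate
def pvScan (p : Int → Int → Bool) : List (Int × Int) :=
  (PySem.List.pyRange 0 5 1).foldl (fun acc x =>
    (PySem.List.pyRange 0 5 1).foldl (fun acc y =>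
      if p x y then acc ++ [(x, y)] else acc) acc) []

def pvCondA (board : List (List Int)) (player x y : Int) : Bool :=
  pvCell board x y == player && !((get_cell_value_neighbor board 0 x y).length == 0)

lemma A_eq_scan (board : List (List Int)) (player : Int) :
    get_player_position board player = pvScan (pvCondA board player) := by
  unfold get_player_position pvScan pvCondA
  congr 1
  funext acc x
  congr 1
  funext acc y
  cases h1 : pvCell board x y == player <;>
    cases h2 : (get_cell_value_neighbor board 0 x y).length == 0 <;>
      simp [h1, bne]

lemma B_eq_scan (board : List (List Int)) (player : Int) :
    get_player_position_alt board player =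
      pvScan (fun x y => PySem.Set.contains (pvFlagged board player) (x, y)) := rfl

lemma scan_congr (p q : Int → Int → Bool)
    (h : ∀ x y, 0 ≤ x → x < 5 → 0 ≤ y → y < 5 → p x y = q x y) :
    pvScan p = pvScan q := by
  unfold pvScan
  apply PySem.List.foldl_congr_mem
  intro acc x hx
  rw [PySem.List.mem_pyRange_one] at hx
  apply PySem.List.foldl_congr_mem
  intro acc y hy
  rw [PySem.List.mem_pyRange_one] at hy
  rw [h x y (by omega) (by omega) (by omega) (by omega)]

-- generic membership characterisation of a set-building foldl
lemma mem_foldl_set {α β : Type} (l : List α) (F : PySem.Set β → α → PySem.Set β)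
    (P : α → β → Prop) (hF : ∀ s a x, x ∈ F s a ↔ x ∈ s ∨ P a x) :
    ∀ (s0 : PySem.Set β) (x : β), x ∈ l.foldl F s0 ↔ x ∈ s0 ∨ ∃ a ∈ l, P a x := by
  induction l with
  | nil => simp
  | cons a l ih =>
    intro s0 x
    simp only [List.foldl_cons, ih, hF, List.mem_cons]
    constructor
    · rintro ((h | h) | ⟨b, hb, h⟩)
      · exact Or.inl h
      · exact Or.inr ⟨a, Or.inl rfl, h⟩
      · exact Or.inr ⟨b, Or.inr hb, h⟩
    · rintro (h | ⟨b, (rfl | hb), h⟩)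
      · exact Or.inl (Or.inl h)
      · exact Or.inl (Or.inr h)
      · exact Or.inr ⟨b, hb, h⟩

lemma mem_flagged (board : List (List Int)) (player : Int) (a b : Int) :
    (a, b) ∈ pvFlagged board player ↔
      ∃ x ∈ PySem.List.pyRange 0 5 1, ∃ y ∈ PySem.List.pyRange 0 5 1,
        pvCell board x y = 0 ∧ (a, b) ∈ pvNeighborsB x y ∧ pvCell board a b = player := by
  unfold pvFlagged
  rw [mem_foldl_set _ _
    (fun x p => ∃ y ∈ PySem.List.pyRange 0 5 1,
      pvCell board x y = 0 ∧ p ∈ pvNeighborsB x y ∧ pvCell board p.1 p.2 = player)]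
  · simp [PySem.Set.empty]
  · intro s x p
    rw [mem_foldl_set _ _
      (fun y q => pvCell board x y = 0 ∧ q ∈ pvNeighborsB x y ∧ pvCell board q.1 q.2 = player)]
    intro s' y q
    by_cases h0 : pvCell board x y = 0
    · simp only [h0, beq_self_eq_true, if_true]
      rw [mem_foldl_set _ _ (fun uv q => pvCell board uv.1 uv.2 = player ∧ q = uv)]
      · constructor
        · rintro (h | ⟨uv, huv, hc, rfl⟩)
          · exact Or.inl h
          · exact Or.inr ⟨trivial, huv, hc⟩
        · rintro (h | ⟨_, hq, hc⟩)
          · exact Or.inl h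
          · exact Or.inr ⟨q, hq, hc, rfl⟩
      · intro s'' uv r
        by_cases hc : pvCell board uv.1 uv.2 = player <;>
          simp [hc, PySem.Set.mem_add]
    · simp [h0]

-- decided finite facts about the neighbour functions
lemma neighbor_sym :
    ((PySem.List.pyRange 0 5 1).all fun x => (PySem.List.pyRange 0 5 1).all fun y =>
      (PySem.List.pyRange 0 5 1).all fun u => (PySem.List.pyRange 0 5 1).all fun v =>
        decide ((u, v) ∈ get_neighbor x y) == decide ((x, y) ∈ pvNeighborsB u v)) = true := by
  decide

lemma neighbor_in_range :
    ((PySem.List.pyRange 0 5 1).all fun x => (PySem.List.pyRange 0 5 1).all fun y =>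
      (get_neighbor x y).all fun uv =>
        decide (0 ≤ uv.1 ∧ uv.1 < 5 ∧ 0 ≤ uv.2 ∧ uv.2 < 5)) = true := by
  decide

lemma nb_range (x y : Int) (hx1 : 0 ≤ x) (hx2 : x < 5) (hy1 : 0 ≤ y) (hy2 : y < 5) :
    ∀ uv ∈ get_neighbor x y, 0 ≤ uv.1 ∧ uv.1 < 5 ∧ 0 ≤ uv.2 ∧ uv.2 < 5 := by
  have h := neighbor_in_range
  simp only [List.all_eq_true, PySem.List.mem_pyRange_one, decide_eq_true_eq] at h
  exact h x ⟨hx1, hx2⟩ y ⟨hy1, hy2⟩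

lemma nb_sym (x y u v : Int) (hx1 : 0 ≤ x) (hx2 : x < 5) (hy1 : 0 ≤ y) (hy2 : y < 5)
    (hu1 : 0 ≤ u) (hu2 : u < 5) (hv1 : 0 ≤ v) (hv2 : v < 5) :
    (u, v) ∈ get_neighbor x y ↔ (x, y) ∈ pvNeighborsB u v := by
  have h := neighbor_sym
  simp only [List.all_eq_true, PySem.List.mem_pyRange_one, beq_iff_eq,
    decide_eq_decide] at h
  exact h x ⟨hx1, hx2⟩ y ⟨hy1, hy2⟩ u ⟨hu1, hu2⟩ v ⟨hv1, hv2⟩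

lemma cond_iff (board : List (List Int)) (player x y : Int)
    (hx1 : 0 ≤ x) (hx2 : x < 5) (hy1 : 0 ≤ y) (hy2 : y < 5) :
    pvCondA board player x y = PySem.Set.contains (pvFlagged board player) (x, y) := by
  rw [Bool.eq_iff_iff]
  rw [PySem.Set.contains_iff, mem_flagged]
  unfold pvCondA get_cell_value_neighbor
  rw [PySem.List.foldl_append_if_eq_filter]
  simp only [Bool.and_eq_true, beq_iff_eq, Bool.not_eq_eq_eq_not, Bool.not_true,
    beq_eq_false_iff_ne, ne_eq, List.length_eq_zero_iff, List.filter_eq_nil_iff, not_forall, not_not,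
    PySem.List.mem_pyRange_one, Bool.not_eq_false, List.nil_append]
  constructor
  · rintro ⟨hp, uv, huv, h0⟩
    obtain ⟨h1, h2, h3, h4⟩ := nb_range x y hx1 hx2 hy1 hy2 uv huv
    refine ⟨uv.1, ⟨h1, h2⟩, uv.2, ⟨h3, h4⟩, h0, ?_, hp⟩
    exact (nb_sym x y uv.1 uv.2 hx1 hx2 hy1 hy2 h1 h2 h3 h4).mp huv
  · rintro ⟨u, ⟨hu1, hu2⟩, v, ⟨hv1, hv2⟩, h0, hmem, hp⟩
    refine ⟨hp, (u, v), ?_, h0⟩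
    exact (nb_sym x y u v hx1 hx2 hy1 hy2 hu1 hu2 hv1 hv2).mpr hmem

-- ===== VERDICT (by name: the statement is the Claim_ definition above) =====
theorem get_player_position_spec : Claim_equal_get_player_position := by
  intro board player _ _
  unfold Spec_get_player_position
  rw [A_eq_scan, B_eq_scan]
  exact scan_congr _ _ (fun x y hx1 hx2 hy1 hy2 => cond_iff board player x y hx1 hx2 hy1 hy2)
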